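-- pv_equiv track=rewrite | github.com/NargathKain/NLP_24-25 | sentence_pipeline/syntactic_analysis_2/syntactic_analysis.py | extract_prepositional_phrases
-- ===== SOURCE A (Python) =====
-- def extract_prepositional_phrases(pos_tags, noun_phrases):
--     # Επιστρέφει λίστα
--     prep_phrases = []
--
--     for i, (token, pos) in enumerate(pos_tags):
--         if pos == 'IN': # Ψάξε το NP που ακολουθεί
--             for start, end, tokens in noun_phrases:
--                 if start == i + 1:
--                     prep_phrases.append((i, start, end))
--                     break
--
--     return prep_phrases
-- ===== SOURCE B (Python) =====
-- def extract_prepositional_phrases(pos_tags, noun_phrases):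
--     # Loop-swapped algorithm: iterate over noun phrases (once), keep only the
--     # first phrase per start position, index pos_tags directly to test for 'IN',
--     # then sort the hits by preposition index to restore pos_tags order
--     # (each index yields at most one hit, so the order is exactly A's).
--     n = len(pos_tags)
--     seen = set()
--     hits = []
--     for start, end, tokens in noun_phrases:
--         if start in seen:
--             continue
--         seen.add(start)
--         if 1 <= start <= n and pos_tags[start - 1][1] == 'IN':
--             hits.append((start - 1, start, end))
--     hits.sort(key=lambda t: t[0])
--     return hits
-- ===== Notes on version B (the rewrite author's own statement) =====
-- stated objective: alternative
-- what changed: Swapped the loop nesting: instead of scanning noun_phrases for every 'IN' tag, B makes one pass over noun_phrases (keeping only the first phrase per start position), indexes pos_tags directly to test for an 'IN' tag at start-1, and sorts the collected hits by preposition index to restore A's output order.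
import Mathlib
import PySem

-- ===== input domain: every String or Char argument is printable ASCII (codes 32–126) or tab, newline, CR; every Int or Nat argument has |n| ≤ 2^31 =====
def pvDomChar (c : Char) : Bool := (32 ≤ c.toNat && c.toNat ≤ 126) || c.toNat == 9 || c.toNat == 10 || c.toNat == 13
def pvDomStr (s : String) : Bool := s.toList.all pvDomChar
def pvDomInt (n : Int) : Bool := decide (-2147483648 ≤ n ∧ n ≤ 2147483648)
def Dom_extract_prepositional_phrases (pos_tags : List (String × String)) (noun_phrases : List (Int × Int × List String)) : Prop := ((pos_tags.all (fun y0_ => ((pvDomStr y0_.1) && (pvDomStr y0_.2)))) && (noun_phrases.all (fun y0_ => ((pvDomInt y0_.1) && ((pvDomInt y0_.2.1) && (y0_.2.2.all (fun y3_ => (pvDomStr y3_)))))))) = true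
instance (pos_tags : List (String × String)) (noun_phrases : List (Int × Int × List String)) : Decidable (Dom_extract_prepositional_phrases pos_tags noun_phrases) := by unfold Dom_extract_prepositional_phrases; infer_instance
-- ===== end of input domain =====

-- B swaps the loops: one pass over noun_phrases (first phrase per start kept, pos_tags indexed
-- directly) followed by a sort on the preposition index; alternative decomposition, same result.

-- ===== PORT A =====
-- A: for each (i,(token,pos)) with pos=='IN', scan noun_phrases for the first with start == i+1 (break).
def extract_prepositional_phrases (pos_tags : List (String × String)) (noun_phrases : List (Int × Int × List String)) : List (Int × Int × Int) :=
  (PySem.List.enumerate pos_tags).foldl (fun prep_phrases p =>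
    if p.2.2 == "IN" then
      match noun_phrases.find? (fun t => t.1 == p.1 + 1) with
      | some t => prep_phrases ++ [(p.1, t.1, t.2.1)]
      | none => prep_phrases
    else prep_phrases) []

-- ===== PORT B =====
-- B's loop over noun_phrases: skip starts already seen, index pos_tags at start-1 after a
-- bounds guard (so the pyGetD default is never used), collect hits.
def pvBLoop (pos_tags : List (String × String)) (n : Int) :
    List (Int × Int × List String) → PySem.Set Int → List (Int × Int × Int) → List (Int × Int × Int)
  | [], _, hits => hits
  | t :: rest, seen, hits =>
    if PySem.Set.contains seen t.1 then pvBLoop pos_tags n rest seen hits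
    else pvBLoop pos_tags n rest (PySem.Set.add seen t.1)
      (if decide (1 ≤ t.1) && decide (t.1 ≤ n) && ((PySem.List.pyGetD pos_tags (t.1 - 1) ("", "")).2 == "IN")
       then hits ++ [(t.1 - 1, t.1, t.2.1)] else hits)

def extract_prepositional_phrases_alt (pos_tags : List (String × String)) (noun_phrases : List (Int × Int × List String)) : List (Int × Int × Int) :=
  PySem.List.sorted (pvBLoop pos_tags (pos_tags.length : Int) noun_phrases PySem.Set.empty [])
    (fun t => t.1) false

-- ===== PRECONDITION & SPEC =====
def Spec_extract_prepositional_phrases (pos_tags : List (String × String)) (noun_phrases : List (Int × Int × List String)) (out : List (Int × Int × Int)) : Prop := out = extract_prepositional_phrases_alt pos_tags noun_phrases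
instance (pos_tags : List (String × String)) (noun_phrases : List (Int × Int × List String)) (out : List (Int × Int × Int)) : Decidable (Spec_extract_prepositional_phrases pos_tags noun_phrases out) := by unfold Spec_extract_prepositional_phrases; infer_instance

-- ===== CLAIM (what is proved, stated in full; the proofs are below) =====
def Claim_equal_extract_prepositional_phrases : Prop := ∀ (pos_tags : List (String × String)) (noun_phrases : List (Int × Int × List String)), Dom_extract_prepositional_phrases pos_tags noun_phrases → Spec_extract_prepositional_phrases pos_tags noun_phrases (extract_prepositional_phrases pos_tags noun_phrases)

-- ===== LEMMAS AND PROOFS =====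

-- A's per-index option: what A appends for index/pos pair p (exactly A's loop body).
def pvF (nps : List (Int × Int × List String)) (p : Int × String × String) : Option (Int × Int × Int) :=
  if p.2.2 == "IN" then
    match nps.find? (fun t => t.1 == p.1 + 1) with
    | some t => some (p.1, t.1, t.2.1)
    | none => none
  else none

-- B's per-phrase option: what B appends for a first-occurrence noun phrase t.
def pvG (pos_tags : List (String × String)) (n : Int) (t : Int × Int × List String) : Option (Int × Int × Int) :=
  if decide (1 ≤ t.1) && decide (t.1 ≤ n) && ((PySem.List.pyGetD pos_tags (t.1 - 1) ("", "")).2 == "IN")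
  then some (t.1 - 1, t.1, t.2.1) else none

-- the sublist of noun phrases whose start is new (first occurrence, start ∉ seen)
def pvFirsts : List (Int × Int × List String) → List Int → List (Int × Int × List String)
  | [], _ => []
  | t :: rest, seen => if t.1 ∈ seen then pvFirsts rest seen else t :: pvFirsts rest (seen ++ [t.1])

-- A's append-fold is a filterMap of pvF
theorem pvFoldLem (nps : List (Int × Int × List String))
    (l : List (Int × String × String)) (acc : List (Int × Int × Int)) :
    l.foldl (fun prep_phrases p =>
      if p.2.2 == "IN" then
        match nps.find? (fun t => t.1 == p.1 + 1) with
        | some t => prep_phrases ++ [(p.1, t.1, t.2.1)]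
        | none => prep_phrases
      else prep_phrases) acc = acc ++ l.filterMap (pvF nps) := by
  induction l generalizing acc with
  | nil => simp
  | cons p rest ih =>
    simp only [List.foldl_cons, List.filterMap_cons, pvF]
    by_cases hin : p.2.2 == "IN"
    · rw [if_pos hin, if_pos hin]
      cases hf : nps.find? (fun t => t.1 == p.1 + 1) with
      | none => rw [ih]; rfl
      | some t => rw [ih, List.append_assoc]; rfl
    · rw [if_neg hin, if_neg hin, ih]; rfl

-- B's loop is a filterMap of pvG over the first-occurrence sublist
theorem pvBLoopLem (pos_tags : List (String × String)) (n : Int)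
    (nps : List (Int × Int × List String)) :
    ∀ (seen : PySem.Set Int) (hits : List (Int × Int × Int)),
    pvBLoop pos_tags n nps seen hits = hits ++ (pvFirsts nps seen).filterMap (pvG pos_tags n) := by
  induction nps with
  | nil => intro seen hits; simp [pvBLoop, pvFirsts]
  | cons t rest ih =>
    intro seen hits
    by_cases hm : t.1 ∈ seen
    · have hc : PySem.Set.contains seen t.1 = true := by simp [PySem.Set.contains, hm]
      simp only [pvBLoop, pvFirsts, hc, if_pos, hm, ih]
    · have hc : PySem.Set.contains seen t.1 = false := by simp [PySem.Set.contains, hm]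
      have hadd : PySem.Set.add seen t.1 = seen ++ [t.1] := by simp [PySem.Set.add, hm]
      have hfir : pvFirsts (t :: rest) seen = t :: pvFirsts rest (seen ++ [t.1]) := by
        simp [pvFirsts, hm]
      have hstep : pvBLoop pos_tags n (t :: rest) seen hits = pvBLoop pos_tags n rest
          (PySem.Set.add seen t.1)
          (if decide (1 ≤ t.1) && decide (t.1 ≤ n) && ((PySem.List.pyGetD pos_tags (t.1 - 1) ("", "")).2 == "IN")
           then hits ++ [(t.1 - 1, t.1, t.2.1)] else hits) := by
        simp [pvBLoop, hm]
      rw [hstep, hadd, ih, hfir, List.filterMap_cons]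
      by_cases hcond : (decide (1 ≤ t.1) && decide (t.1 ≤ n) && ((PySem.List.pyGetD pos_tags (t.1 - 1) ("", "")).2 == "IN")) = true
      · have hg : pvG pos_tags n t = some (t.1 - 1, t.1, t.2.1) := by simp [pvG, hcond]
        rw [if_pos hcond, hg, List.append_assoc]; rfl
      · have hg : pvG pos_tags n t = none := by simp only [pvG, hcond]; rfl
        rw [if_neg hcond, hg]

-- membership in pvFirsts = "first noun phrase with this start, start not already seen"
theorem pvMemFirsts (t : Int × Int × List String) :
    ∀ (nps : List (Int × Int × List String)) (seen : List Int),
    t ∈ pvFirsts nps seen ↔ t.1 ∉ seen ∧ nps.find? (fun u => u.1 == t.1) = some t := by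
  intro nps
  induction nps with
  | nil => intro seen; simp [pvFirsts]
  | cons u rest ih =>
    intro seen
    simp only [pvFirsts, List.find?_cons]
    by_cases hm : u.1 ∈ seen
    · rw [if_pos hm, ih]
      by_cases he : u.1 = t.1
      · have hb : (u.1 == t.1) = true := by simp [he]
        have hts : t.1 ∈ seen := he ▸ hm
        simp [hb, hts]
      · have hb : (u.1 == t.1) = false := by simp [he]
        simp [hb]
    · rw [if_neg hm]
      simp only [List.mem_cons, ih]
      by_cases he : u.1 = t.1
      · have hb : (u.1 == t.1) = true := by simp [he]
        simp only [hb]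
        constructor
        · rintro (rfl | ⟨hns, hf⟩)
          · exact ⟨hm, rfl⟩
          · exact absurd (List.mem_append.mpr (Or.inr (by simp [he]))) hns
        · rintro ⟨hns, hu⟩
          exact Or.inl (by injection hu with h; exact h.symm)
      · have hb : (u.1 == t.1) = false := by simp [he]
        simp only [hb]
        constructor
        · rintro (rfl | ⟨hns, hf⟩)
          · exact absurd rfl he
          · exact ⟨fun h => hns (List.mem_append.mpr (Or.inl h)), hf⟩
        · rintro ⟨hns, hf⟩
          refine Or.inr ⟨fun h => ?_, hf⟩
          rcases List.mem_append.mp h with h | h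
          · exact hns h
          · exact he (List.mem_singleton.mp h).symm

-- the starts collected by pvFirsts are pairwise distinct and avoid seen
theorem pvFirstsNodup (nps : List (Int × Int × List String)) :
    ∀ (seen : List Int),
    (pvFirsts nps seen).Pairwise (fun a b => a.1 ≠ b.1) ∧ ∀ x ∈ pvFirsts nps seen, x.1 ∉ seen := by
  induction nps with
  | nil => intro seen; simp [pvFirsts]
  | cons t rest ih =>
    intro seen
    simp only [pvFirsts]
    by_cases hm : t.1 ∈ seen
    · rw [if_pos hm]; exact (ih seen)
    · rw [if_neg hm]
      obtain ⟨hp, hs⟩ := ih (seen ++ [t.1])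
      refine ⟨List.Pairwise.cons ?_ hp, ?_⟩
      · intro x hx heq
        exact (hs x hx) (List.mem_append.mpr (Or.inr (heq ▸ List.mem_singleton.mpr rfl)))
      · intro x hx
        rcases List.mem_cons.mp hx with rfl | hx'
        · exact hm
        · exact fun h => (hs x hx') (List.mem_append.mpr (Or.inl h))

-- pvG produces first component t.1 - 1
theorem pvG_eq_some (pos_tags : List (String × String)) (n : Int) (t : Int × Int × List String)
    (x : Int × Int × Int) :
    pvG pos_tags n t = some x ↔
      1 ≤ t.1 ∧ t.1 ≤ n ∧ (PySem.List.pyGetD pos_tags (t.1 - 1) ("", "")).2 = "IN" ∧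
        x = (t.1 - 1, t.1, t.2.1) := by
  simp only [pvG]
  by_cases h : (decide (1 ≤ t.1) && decide (t.1 ≤ n) && ((PySem.List.pyGetD pos_tags (t.1 - 1) ("", "")).2 == "IN")) = true
  · simp only [h, if_true]
    simp only [Bool.and_eq_true, decide_eq_true_eq, beq_iff_eq] at h
    simp [h.1.1, h.1.2, h.2, eq_comm]
  · simp only [h, Bool.false_eq_true, if_false]
    simp only [Bool.and_eq_true, decide_eq_true_eq, beq_iff_eq] at h
    constructor
    · intro hx; cases hx
    · rintro ⟨h1, h2, h3, _⟩; exact absurd ⟨⟨h1, h2⟩, h3⟩ h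

-- the two hit sets coincide (same membership)
theorem pvMemIff (pos_tags : List (String × String)) (nps : List (Int × Int × List String))
    (x : Int × Int × Int) :
    x ∈ (pvFirsts nps []).filterMap (pvG pos_tags (pos_tags.length : Int)) ↔
      x ∈ (PySem.List.enumerate pos_tags).filterMap (pvF nps) := by
  simp only [List.mem_filterMap]
  constructor
  · rintro ⟨t, ht, hg⟩
    rw [pvMemFirsts] at ht
    obtain ⟨-, hfind⟩ := ht
    rw [pvG_eq_some] at hg
    obtain ⟨h1, h2, hIN, rfl⟩ := hg
    set k : Nat := (t.1 - 1).toNat with hk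
    have hki : (k : Int) = t.1 - 1 := by omega
    have hklt : k < pos_tags.length := by omega
    refine ⟨((k : Int), pos_tags[k]), ?_, ?_⟩
    · rw [PySem.List.mem_enumerate_iff]
      exact ⟨k, hklt, by simp⟩
    · have hget : PySem.List.pyGetD pos_tags (t.1 - 1) ("", "") = pos_tags[k] := by
        rw [← hki, PySem.List.pyGetD_natCast]
        exact List.getD_eq_getElem _ _ hklt
      have hpred : (fun u : Int × Int × List String => u.1 == (k : Int) + 1) =
          (fun u : Int × Int × List String => u.1 == t.1) := by
        funext u; congr 1; omega
      have hIN' : (pos_tags[k].2 == "IN") = true := by rw [← hget]; simp [hIN]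
      have hpred' : (fun u : Int × Int × List String => u.1 == t.1 - 1 + 1) =
          (fun u : Int × Int × List String => u.1 == t.1) := by
        funext u; congr 1; ring
      simp only [pvF, hIN', if_pos, hki, hpred', hfind]
  · rintro ⟨p, hp, hf⟩
    rw [PySem.List.mem_enumerate_iff] at hp
    obtain ⟨k, hklt, rfl⟩ := hp
    simp only [pvF] at hf
    by_cases hin : (pos_tags[k].2 == "IN") = true
    · simp only [hin, if_true] at hf
      cases hfind : nps.find? (fun t => t.1 == (0 : Int) + (k : Int) + 1) with
      | none => rw [hfind] at hf; cases hf
      | some u =>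
        rw [hfind] at hf
        have hu1 : u.1 = (k : Int) + 1 := by
          have := List.find?_some hfind
          simp at this; omega
        refine ⟨u, ?_, ?_⟩
        · rw [pvMemFirsts]
          refine ⟨by simp, ?_⟩
          have hpred : (fun v : Int × Int × List String => v.1 == u.1) =
              (fun v : Int × Int × List String => v.1 == (0 : Int) + (k : Int) + 1) := by
            funext v; congr 1; omega
          rw [hpred, hfind]
        · rw [pvG_eq_some]
          have hget : PySem.List.pyGetD pos_tags (u.1 - 1) ("", "") = pos_tags[k] := by
            have : u.1 - 1 = ((k : Nat) : Int) := by omega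
            rw [this, PySem.List.pyGetD_natCast]
            exact List.getD_eq_getElem _ _ hklt
          refine ⟨by omega, by omega, by rw [hget]; exact beq_iff_eq.mp hin, ?_⟩
          cases hf
          simp only [Prod.mk.injEq, and_true]
          omega
    · simp only [hin, Bool.false_eq_true, if_false] at hf; cases hf

-- A's output has strictly increasing first components
theorem pvAPairwise (pos_tags : List (String × String)) (nps : List (Int × Int × List String)) :
    ((PySem.List.enumerate pos_tags).filterMap (pvF nps)).Pairwise (fun a b => a.1 < b.1) := by
  rw [List.pairwise_filterMap]
  refine (PySem.List.pairwise_lt_enumerate pos_tags 0).imp_of_mem ?_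
  intro p q _ _ hpq x hx y hy
  have hxp : x.1 = p.1 := by
    simp only [pvF] at hx
    by_cases h : (p.2.2 == "IN") = true
    · simp only [h, if_true] at hx
      cases hfind : nps.find? (fun t => t.1 == p.1 + 1) with
      | none => rw [hfind] at hx; cases hx
      | some t => rw [hfind] at hx; cases hx; rfl
    · simp [h] at hx
  have hyq : y.1 = q.1 := by
    simp only [pvF] at hy
    by_cases h : (q.2.2 == "IN") = true
    · simp only [h, if_true] at hy
      cases hfind : nps.find? (fun t => t.1 == q.1 + 1) with
      | none => rw [hfind] at hy; cases hy
      | some t => rw [hfind] at hy; cases hy; rfl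
    · simp [h] at hy
  rw [hxp, hyq]; exact hpq

-- B's unsorted hits have pairwise distinct first components, hence are Nodup
theorem pvBNodup (pos_tags : List (String × String)) (nps : List (Int × Int × List String)) :
    ((pvFirsts nps []).filterMap (pvG pos_tags (pos_tags.length : Int))).Nodup := by
  have hp : ((pvFirsts nps []).filterMap (pvG pos_tags (pos_tags.length : Int))).Pairwise
      (fun a b => a.1 ≠ b.1) := by
    rw [List.pairwise_filterMap]
    refine ((pvFirstsNodup nps []).1).imp_of_mem ?_
    intro t u _ _ htu x hx y hy
    rw [pvG_eq_some] at hx hy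
    obtain ⟨_, _, _, rfl⟩ := hx
    obtain ⟨_, _, _, rfl⟩ := hy
    simpa using fun h => htu (by omega)
  exact hp.imp (fun h he => by rw [he] at h; exact h rfl)

-- ===== VERDICT (by name: the statement is the Claim_ definition above) =====
theorem extract_prepositional_phrases_spec : Claim_equal_extract_prepositional_phrases := by
  intro pos_tags noun_phrases _
  unfold Spec_extract_prepositional_phrases extract_prepositional_phrases extract_prepositional_phrases_alt
  rw [pvFoldLem noun_phrases (PySem.List.enumerate pos_tags) [], List.nil_append,
    pvBLoopLem pos_tags (pos_tags.length : Int) noun_phrases PySem.Set.empty [], List.nil_append]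
  have hperm : ((PySem.List.enumerate pos_tags).filterMap (pvF noun_phrases)).Perm
      ((pvFirsts noun_phrases []).filterMap (pvG pos_tags (pos_tags.length : Int))) := by
    have hnA : ((PySem.List.enumerate pos_tags).filterMap (pvF noun_phrases)).Nodup :=
      (pvAPairwise pos_tags noun_phrases).imp (fun h he => by rw [he] at h; exact absurd h (lt_irrefl _))
    refine (List.perm_ext_iff_of_nodup hnA (pvBNodup pos_tags noun_phrases)).mpr ?_
    intro a
    exact (pvMemIff pos_tags noun_phrases a).symm
  exact (PySem.List.sorted_eq_of_perm_of_pairwise_lt _ _ (fun t => t.1) hperm (pvAPairwise pos_tags noun_phrases)).symm
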